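-- pv_equiv track=rewrite | github.com/adithyakr8055/Basketball_Analysis | tools/build_analytics_tables.py | _segment_possessions
-- ===== SOURCE A (Python) =====
-- from typing import Dict, Any, List, Tuple, Optional
--
-- def _segment_possessions(ball_acquisition: List[int]) -> List[int]:
--     """
--     Build a possession_id list the same length as ball_acquisition.
--     possession_id increments whenever the possessing team changes or we go from -1→valid or valid→-1.
--     """
--     n = len(ball_acquisition)
--     possession_ids = [-1] * n
--     current_possession = -1
--     current_team = -1
--
--     def _team_of(holder: int, frame_assign: Dict[int, int]) -> int:
--         return frame_assign.get(holder, -1)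
--
--     # team info is not available here yet; we’ll adjust later when building rows.
--     # For now, we segment simply by holder change including -1 transitions.
--     current_possession = 0
--     last_holder = ball_acquisition[0] if n > 0 else -1
--
--     for i in range(n):
--         holder = ball_acquisition[i]
--         if i == 0:
--             possession_ids[i] = current_possession if holder != -1 else -1
--             last_holder = holder
--             continue
--
--         if holder == -1:
--             # no possession -> mark as -1
--             possession_ids[i] = -1
--         else:
--             if last_holder == -1:
--                 # new possession begins
--                 current_possession += 1
--                 possession_ids[i] = current_possession
--             else:
--                 if holder != last_holder:
--                     # holder changed -> new possession
--                     current_possession += 1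
--                 possession_ids[i] = current_possession
--         last_holder = holder
--
--     return possession_ids
-- ===== SOURCE B (Python) =====
-- from itertools import groupby
-- from typing import List
--
-- def _segment_possessions(ball_acquisition: List[int]) -> List[int]:
--     if not ball_acquisition:
--         return []
--     counter = 0 if ball_acquisition[0] != -1 else 1
--     out: List[int] = []
--     for key, grp in groupby(ball_acquisition):
--         n = sum(1 for _ in grp)
--         if key == -1:
--             out.extend([-1] * n)
--         else:
--             out.extend([counter] * n)
--             counter += 1
--     return out
-- ===== Notes on version B (the rewrite author's own statement) =====
-- stated objective: simpler
-- what changed: B segments the sequence into runs of equal holders with itertools.groupby and emits each run's id in one block (a per-valid-run counter starting at 0 or 1 depending on the first frame), instead of A's index loop tracking last_holder and writing into a preallocated array.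
import Mathlib
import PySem

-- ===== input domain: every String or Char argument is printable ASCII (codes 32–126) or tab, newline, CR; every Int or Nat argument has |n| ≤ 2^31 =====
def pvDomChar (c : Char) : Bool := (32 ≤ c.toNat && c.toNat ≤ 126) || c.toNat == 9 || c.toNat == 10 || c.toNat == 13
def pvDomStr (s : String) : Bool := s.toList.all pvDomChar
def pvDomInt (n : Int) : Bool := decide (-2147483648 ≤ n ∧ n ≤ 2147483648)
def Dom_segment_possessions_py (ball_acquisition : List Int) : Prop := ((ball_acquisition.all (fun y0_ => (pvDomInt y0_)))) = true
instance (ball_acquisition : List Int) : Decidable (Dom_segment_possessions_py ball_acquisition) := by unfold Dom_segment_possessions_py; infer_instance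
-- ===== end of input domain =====

-- B replaces A's index loop (last_holder tracking, preallocated [-1]*n array) by
-- run-length segmentation (itertools.groupby) emitting each run's id in one block: simpler decomposition.
-- ===== PORT A =====
-- possession_ids[i] is written exactly at iteration i, in order, so the preallocated
-- [-1]*n array is ported exactly as building the list left-to-right; loop state =
-- (possession_ids so far, current_possession, last_holder, i).
def pvStepA (st : List Int × Int × Int × Nat) (holder : Int) : List Int × Int × Int × Nat :=
  let ids := st.1
  let cur := st.2.1
  let last := st.2.2.1
  let i := st.2.2.2
  if i = 0 then
    (ids ++ [if holder ≠ -1 then cur else -1], cur, holder, i + 1)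
  else if holder = -1 then
    (ids ++ [-1], cur, holder, i + 1)
  else if last = -1 then
    (ids ++ [cur + 1], cur + 1, holder, i + 1)
  else if holder ≠ last then
    (ids ++ [cur + 1], cur + 1, holder, i + 1)
  else
    (ids ++ [cur], cur, holder, i + 1)

def segment_possessions_py (ball_acquisition : List Int) : List Int :=
  let last0 : Int := match ball_acquisition with | [] => -1 | h :: _ => h
  (ball_acquisition.foldl pvStepA ([], 0, last0, 0)).1

-- ===== PORT B =====
-- itertools.groupby ported as run-length encoding consumed left to right.
def pvRunsFrom (k : Int) (c : Nat) : List Int → List (Int × Nat)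
  | [] => [(k, c)]
  | h :: t => if h = k then pvRunsFrom k (c + 1) t else (k, c) :: pvRunsFrom h 1 t

def pvEmit (ctr : Int) : List (Int × Nat) → List Int
  | [] => []
  | (k, c) :: rest =>
    if k = -1 then List.replicate c (-1) ++ pvEmit ctr rest
    else List.replicate c ctr ++ pvEmit (ctr + 1) rest

def segment_possessions_py_alt (ball_acquisition : List Int) : List Int :=
  match ball_acquisition with
  | [] => []
  | h :: t =>
    let offset : Int := if h ≠ -1 then 0 else 1
    pvEmit offset (pvRunsFrom h 1 t)

-- ===== PRECONDITION & SPEC =====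
def Spec_segment_possessions_py (ball_acquisition : List Int) (out : List Int) : Prop := out = segment_possessions_py_alt ball_acquisition
instance (ball_acquisition : List Int) (out : List Int) : Decidable (Spec_segment_possessions_py ball_acquisition out) := by unfold Spec_segment_possessions_py; infer_instance

-- ===== CLAIM (what is proved, stated in full; the proofs are below) =====
def Claim_equal_segment_possessions_py : Prop := ∀ (ball_acquisition : List Int), Dom_segment_possessions_py ball_acquisition → Spec_segment_possessions_py ball_acquisition (segment_possessions_py ball_acquisition)

-- ===== LEMMAS AND PROOFS =====
-- Reference recursion: the tail of the result, given current_possession and last_holder.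
def pvF : List Int → Int → Int → List Int
  | [], _, _ => []
  | h :: t, cur, last =>
    if h = -1 then -1 :: pvF t cur (-1)
    else if last = -1 then (cur + 1) :: pvF t (cur + 1) h
    else if h ≠ last then (cur + 1) :: pvF t (cur + 1) h
    else cur :: pvF t cur h

lemma pvStepA_fold (t : List Int) : ∀ (ids : List Int) (cur last : Int) (i : Nat),
    (t.foldl pvStepA (ids, cur, last, i + 1)).1 = ids ++ pvF t cur last := by
  induction t with
  | nil => intro ids cur last i; simp [pvF]
  | cons h t ih =>
    intro ids cur last i
    simp only [List.foldl_cons, pvStepA, Nat.succ_ne_zero, if_false]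
    by_cases h1 : h = -1
    · simp [h1, pvF, ih]
    · by_cases h2 : last = -1
      · simp [h1, h2, pvF, ih]
      · by_cases h3 : h = last
        · simp [h1, h2, h3, pvF, ih]
        · simp [h1, h2, h3, pvF, ih]

lemma pvEmit_runsFrom (t : List Int) : ∀ (k : Int) (c : Nat) (ctr : Int),
    pvEmit ctr (pvRunsFrom k c t) =
      (if k = -1 then List.replicate c (-1) ++ pvF t (ctr - 1) (-1)
       else List.replicate c ctr ++ pvF t ctr k) := by
  induction t with
  | nil => intro k c ctr; by_cases hk : k = -1 <;> simp [pvRunsFrom, pvEmit, pvF, hk]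
  | cons h t ih =>
    intro k c ctr
    by_cases hhk : h = k
    · subst hhk
      by_cases hk : h = -1
      · simp [pvRunsFrom, hk, ih, pvF, List.replicate_succ' , List.append_assoc]
      · simp [pvRunsFrom, hk, ih, pvF, List.replicate_succ', List.append_assoc]
    · by_cases hk : k = -1
      · have hh : h ≠ -1 := by rw [hk] at hhk; exact hhk
        have e : ctr - 1 + 1 = ctr := by ring
        simp [pvRunsFrom, hhk, pvEmit, hk, ih, hh, pvF, e]
      · have hkh : ¬((-1 : Int) = k) := fun h' => hk h'.symm
        by_cases hh : h = -1
        · have e : ctr + 1 - 1 = ctr := by ring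
          simp [pvRunsFrom, hkh, pvEmit, hk, ih, hh, pvF, e]
        · simp [pvRunsFrom, hhk, pvEmit, hk, ih, hh, pvF]

-- ===== VERDICT (by name: the statement is the Claim_ definition above) =====
theorem segment_possessions_py_spec : Claim_equal_segment_possessions_py := by
  intro ball _
  unfold Spec_segment_possessions_py
  cases ball with
  | nil => rfl
  | cons h t =>
    show (List.foldl pvStepA (pvStepA ([], 0, h, 0) h) t).1 = _
    have hstep : pvStepA ([], 0, h, 0) h = ([if h ≠ -1 then 0 else -1], 0, h, 1) := by
      simp [pvStepA]
    rw [hstep]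
    have := pvStepA_fold t [if h ≠ -1 then (0 : Int) else -1] 0 h 0
    rw [this]
    by_cases hh : h = -1
    · simp [segment_possessions_py_alt, hh, pvEmit_runsFrom, pvF]
    · simp [segment_possessions_py_alt, hh, pvEmit_runsFrom, pvF]
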